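-- pv_equiv track=rewrite | github.com/bowook/Programmers | 프로그래머스/unrated/133502. 햄버거 만들기/햄버거 만들기.py | solution
-- ===== SOURCE A (Python) =====
-- def solution(ingredient):
--     #1 - 2 - 3 - 1 -> 햄버거 1개
--     answer = 0
--     stack = []
--     for i in ingredient:
--         stack.append(i)
--         if stack[-4:] == [1,2,3,1]:
--             answer += 1
--             for i in range(4):
--                 stack.pop()
--     return answer
-- ===== SOURCE B (Python) =====
-- def solution(ingredient):
--     lst = list(ingredient)
--     answer = 0
--     while True:
--         found = None
--         for i in range(len(lst)):
--             if lst[i:i+4] == [1, 2, 3, 1]: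
--                 found = i
--                 break
--         if found is None:
--             return answer
--         del lst[found:found+4]
--         answer += 1
-- ===== Notes on version B (the rewrite author's own statement) =====
-- stated objective: alternative
-- what changed: Replaces the online stack (push each ingredient, pop when the top four are 1-2-3-1) by a repeated-leftmost-removal reduction: scan a copy for the first slice equal to [1,2,3,1], delete it, count, and restart until no match remains.
import Mathlib
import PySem

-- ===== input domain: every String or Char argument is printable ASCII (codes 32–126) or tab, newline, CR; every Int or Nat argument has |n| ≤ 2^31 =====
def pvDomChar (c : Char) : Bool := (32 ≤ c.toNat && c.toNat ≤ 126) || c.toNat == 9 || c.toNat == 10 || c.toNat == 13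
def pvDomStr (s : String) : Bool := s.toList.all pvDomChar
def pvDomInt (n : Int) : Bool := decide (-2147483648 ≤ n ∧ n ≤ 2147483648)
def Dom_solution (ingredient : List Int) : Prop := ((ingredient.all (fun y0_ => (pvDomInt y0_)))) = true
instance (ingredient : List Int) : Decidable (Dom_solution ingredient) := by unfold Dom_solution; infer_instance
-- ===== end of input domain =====

-- B replaces A's online stack by repeated deletion of the leftmost [1,2,3,1] slice; same count, alternative algorithm (not faster).

-- ===== PORT A =====
-- stack[-4:] is the last min(4, len) elements: drop (length - 4) with Nat subtraction is exact.
def solutionStep (st : Int × List Int) (i : Int) : Int × List Int :=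
  let stack := st.2 ++ [i]
  if stack.drop (stack.length - 4) = [1, 2, 3, 1] then
    -- for i in range(4): stack.pop()
    (st.1 + 1, stack.dropLast.dropLast.dropLast.dropLast)
  else (st.1, stack)

def solution (ingredient : List Int) : Int :=
  (ingredient.foldl solutionStep ((0 : Int), ([] : List Int))).1

-- ===== PORT B =====
-- the inner 'for i in range(len(lst)): if lst[i:i+4] == [1,2,3,1]: found = i; break'
-- (lst[i:i+4] is (lst.drop i).take 4; scanning suffixes one by one is that loop, exact)
def findPat : List Int → Option Nat
  | [] => none
  | x :: rest =>
    if (x :: rest).take 4 = [1, 2, 3, 1] then some 0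
    else (findPat rest).map (· + 1)

theorem findPat_bound : ∀ (s : List Int) (i : Nat), findPat s = some i → i + 4 ≤ s.length := by
  intro s
  induction s with
  | nil => intro i h; simp [findPat] at h
  | cons x rest ih =>
    intro i h
    simp only [findPat] at h
    split at h
    · rename_i hp
      cases h
      have := congrArg List.length hp
      simp only [List.length_take, List.length_cons] at this ⊢
      omega
    · rcases Option.map_eq_some_iff.mp h with ⟨k, hk, rfl⟩
      have := ih k hk
      simp only [List.length_cons]
      omega

-- the outer while-loop: delete lst[found:found+4], answer += 1, rescan
def solutionAltLoop (lst : List Int) (answer : Int) : Int :=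
  match h : findPat lst with
  | none => answer
  | some i => solutionAltLoop (lst.take i ++ lst.drop (i + 4)) (answer + 1)
termination_by lst.length
decreasing_by
  have hb := findPat_bound lst i h
  simp [List.length_take, List.length_drop]
  omega

def solution_alt (ingredient : List Int) : Int :=
  solutionAltLoop ingredient 0

-- ===== PRECONDITION & SPEC =====
def Spec_solution (ingredient : List Int) (out : Int) : Prop := out = solution_alt ingredient
instance (ingredient : List Int) (out : Int) : Decidable (Spec_solution ingredient out) := by unfold Spec_solution; infer_instance

-- ===== CLAIM (what is proved, stated in full; the proofs are below) =====
def Claim_equal_solution : Prop := ∀ (ingredient : List Int), Dom_solution ingredient → Spec_solution ingredient (solution ingredient)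

-- ===== LEMMAS AND PROOFS =====

theorem loop_none {lst : List Int} {answer : Int} (h : findPat lst = none) :
    solutionAltLoop lst answer = answer := by
  rw [solutionAltLoop]
  split <;> simp_all

theorem loop_some {lst : List Int} {answer : Int} {i : Nat} (h : findPat lst = some i) :
    solutionAltLoop lst answer = solutionAltLoop (lst.take i ++ lst.drop (i + 4)) (answer + 1) := by
  rw [solutionAltLoop]
  split <;> simp_all

-- 'M s j': the four elements starting at index j are the pattern
def M (s : List Int) (j : Nat) : Prop := (s.drop j).take 4 = [1, 2, 3, 1]

theorem M_length {s : List Int} {j : Nat} (h : M s j) : j + 4 ≤ s.length := by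
  have := congrArg List.length h
  simp [List.length_take, List.length_drop] at this ⊢
  omega

theorem findPat_none_iff (s : List Int) : findPat s = none ↔ ∀ j, ¬ M s j := by
  induction s with
  | nil =>
    simp [findPat, M]
  | cons x rest ih =>
    simp only [findPat]
    split
    · rename_i hp
      constructor
      · intro h; cases h
      · intro h; exact absurd hp (h 0)
    · rename_i hp
      simp only [Option.map_eq_none_iff, ih]
      constructor
      · intro h j
        cases j with
        | zero => exact hp
        | succ k => exact h k
      · intro h k
        exact h (k + 1)

theorem findPat_some_of (s : List Int) (i : Nat) (hm : M s i) (hmin : ∀ j, j < i → ¬ M s j) :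
    findPat s = some i := by
  induction s generalizing i with
  | nil =>
    exact absurd (M_length hm) (by simp)
  | cons x rest ih =>
    simp only [findPat]
    cases i with
    | zero => simp [M] at hm; simp [hm]
    | succ k =>
      have h0 : ¬ M (x :: rest) 0 := hmin 0 (Nat.succ_pos k)
      simp only [M, List.drop_zero] at h0
      rw [if_neg h0]
      have : findPat rest = some k := by
        apply ih k
        · exact hm
        · intro j hj hMj
          exact hmin (j + 1) (by omega) hMj
      simp [this]

theorem M_append_left {s t : List Int} {j : Nat} (h : j + 4 ≤ s.length) :
    M (s ++ t) j ↔ M s j := by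
  unfold M
  rw [List.drop_append_of_le_length (by omega)]
  rw [List.take_append_of_le_length (by simp [List.length_drop]; omega)]

theorem M_take {s : List Int} {m j : Nat} (h : M (s.take m) j) : M s j := by
  unfold M at h ⊢
  have hl := M_length h
  simp [List.length_take] at hl
  rw [List.drop_take] at h
  rw [List.take_take] at h
  have : min 4 (m - j) = 4 := by omega
  rwa [this] at h

-- A's stack after the four pops is the stack with its last four elements removed
theorem dropLast4_eq_take (s : List Int) (h : 4 ≤ s.length) :
    s.dropLast.dropLast.dropLast.dropLast = s.take (s.length - 4) := by
  simp [List.dropLast_eq_take, List.take_take, List.length_take]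
  omega

-- Main loop invariant: running A's fold from a pattern-free stack counts exactly
-- B's repeated-leftmost-removal count of (stack ++ xs), with the running answer.
theorem main_inv : ∀ (xs stack : List Int) (answer : Int),
    (∀ j, ¬ M stack j) →
    (xs.foldl solutionStep (answer, stack)).1 = solutionAltLoop (stack ++ xs) answer := by
  intro xs
  induction xs with
  | nil =>
    intro stack answer hno
    have hfp : findPat stack = none := (findPat_none_iff stack).mpr hno
    simp only [List.foldl_nil, List.append_nil]
    exact (loop_none hfp).symm
  | cons x rest ih =>
    intro stack answer hno
    simp only [List.foldl_cons]
    set stack' := stack ++ [x] with hs'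
    have hlen' : stack'.length = stack.length + 1 := by simp [hs']
    by_cases hmatch : stack'.drop (stack'.length - 4) = [1, 2, 3, 1]
    · -- the new top four are the pattern
      have h4 : 4 ≤ stack'.length := by
        by_contra hlt
        have := congrArg List.length hmatch
        simp [List.length_drop] at this
        omega
      have hMtop : M stack' (stack'.length - 4) := by
        unfold M
        have htk : (stack'.drop (stack'.length - 4)).take 4 = stack'.drop (stack'.length - 4) :=
          List.take_of_length_le (by simp [List.length_drop]; omega)
        rw [htk]
        exact hmatch
      -- no match strictly before the top in stack'
      have hmin' : ∀ j, j < stack'.length - 4 → ¬ M stack' j := by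
        intro j hj hMj
        have hb : j + 4 ≤ stack.length := by omega
        have : M stack j := by
          rw [hs'] at hMj
          exact (M_append_left hb).mp hMj
        exact hno j this
      -- leftmost match of stack' ++ rest is at stack'.length - 4
      have hfp : findPat (stack' ++ rest) = some (stack'.length - 4) := by
        apply findPat_some_of
        · rw [M_append_left (by omega)]; exact hMtop
        · intro j hj hMj
          have hb : j + 4 ≤ stack'.length := by omega
          exact hmin' j hj ((M_append_left hb).mp hMj)
      have hstep : solutionStep (answer, stack) x =
          (answer + 1, stack'.take (stack'.length - 4)) := by
        simp only [solutionStep]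
        rw [if_pos hmatch]
        rw [dropLast4_eq_take stack' h4]
      rw [hstep]
      have hnew : ∀ j, ¬ M (stack'.take (stack'.length - 4)) j := by
        intro j hMj
        have hMs' : M stack' j := M_take hMj
        have hl := M_length hMj
        simp [List.length_take] at hl
        exact hmin' j (by omega) hMs'
      rw [ih _ (answer + 1) hnew]
      -- one step of B's loop on stack' ++ rest
      have hsplit : stack ++ x :: rest = stack' ++ rest := by
        rw [hs', List.append_assoc]
        rfl
      rw [hsplit, loop_some hfp]
      have ht : (stack' ++ rest).take (stack'.length - 4) = stack'.take (stack'.length - 4) := by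
        rw [List.take_append_of_le_length (by omega)]
      have hd : (stack' ++ rest).drop (stack'.length - 4 + 4) = rest := by
        have : stack'.length - 4 + 4 = stack'.length := by omega
        rw [this, List.drop_append_of_le_length (le_refl _)]
        simp
      rw [ht, hd]
    · -- no new match: the stack grows
      have hstep : solutionStep (answer, stack) x = (answer, stack') := by
        simp only [solutionStep]
        rw [if_neg hmatch]
      rw [hstep]
      have hno' : ∀ j, ¬ M stack' j := by
        intro j hMj
        have hl := M_length hMj
        by_cases hc : j + 4 ≤ stack.length
        · exact hno j ((M_append_left hc).mp hMj)
        · have hj : j = stack'.length - 4 := by omega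
          apply hmatch
          unfold M at hMj
          rw [hj] at hMj
          have hlen : (stack'.drop (stack'.length - 4)).length = 4 := by
            simp [List.length_drop]; omega
          rw [List.take_of_length_le (by omega)] at hMj
          exact hMj
      rw [ih stack' answer hno']
      rw [hs', List.append_assoc]
      rfl

-- ===== VERDICT (by name: the statement is the Claim_ definition above) =====
theorem solution_spec : Claim_equal_solution := by
  intro ingredient _
  unfold Spec_solution solution solution_alt
  have := main_inv ingredient [] 0 (by intro j h; have := M_length h; simp at this)
  simpa using this
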